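-- pv_equiv track=rewrite | github.com/Nagillimi/Skiing-Logging | src/utilities/sig_proc.py | groupClosePointsIntoRanges
-- ===== SOURCE A (Python) =====
-- def groupClosePointsIntoRanges(idxs: list, th=2):
--     """Return list of ranges of sequential points grouped by closeness,
--     whose changes are separated by values greater than `th`
--     """
--     ranges = []
--     if len(idxs) == 0:
--         return ranges
--     x1 = idxs[0]
--     x2 = idxs[-1]
--     for i in range(len(idxs) - 1):
--         if idxs[i + 1] - idxs[i] > th:
--             ranges.append([x1, idxs[i]])
--             x1 = idxs[i + 1]
--     ranges.append([x1, x2])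
--     return ranges
-- ===== SOURCE B (Python) =====
-- def groupClosePointsIntoRanges(idxs: list, th=2):
--     """Group sequential close points into groups, then emit [first, last] per group."""
--     groups = []
--     cur = []
--     for x in idxs:
--         if cur and x - cur[-1] > th:
--             groups.append(cur)
--             cur = [x]
--         else:
--             cur = cur + [x]
--     if cur:
--         groups.append(cur)
--     return [[g[0], g[-1]] for g in groups]
-- ===== Notes on version B (the rewrite author's own statement) =====
-- stated objective: alternative
-- what changed: B first partitions the points into an explicit list of consecutive-close groups and then maps each group to [first, last], instead of A's single index loop with running x1/x2 endpoint accumulators.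
import Mathlib
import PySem

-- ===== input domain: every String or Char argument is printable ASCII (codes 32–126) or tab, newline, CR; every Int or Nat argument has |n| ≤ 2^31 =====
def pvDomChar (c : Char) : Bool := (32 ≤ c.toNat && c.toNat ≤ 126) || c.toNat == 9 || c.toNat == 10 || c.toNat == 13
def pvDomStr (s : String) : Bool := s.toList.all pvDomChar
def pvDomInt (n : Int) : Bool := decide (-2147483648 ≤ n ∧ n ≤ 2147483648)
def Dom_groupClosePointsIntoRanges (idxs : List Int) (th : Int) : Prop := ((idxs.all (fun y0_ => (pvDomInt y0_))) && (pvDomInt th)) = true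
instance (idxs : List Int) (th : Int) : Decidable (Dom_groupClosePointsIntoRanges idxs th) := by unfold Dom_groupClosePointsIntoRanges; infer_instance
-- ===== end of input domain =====

-- B groups consecutive close points into explicit sublists and maps each to [first,last]; alternative decomposition, same cost.


-- ===== PORT A =====
def groupClosePointsIntoRanges (idxs : List Int) (th : Int) : List (List Int) :=
  let ranges : List (List Int) := []
  if idxs.length = 0 then ranges
  else
    let x1 := PySem.List.pyGetD idxs 0 0
    let x2 := PySem.List.pyGetD idxs (-1) 0
    let st := (PySem.List.pyRange 0 ((idxs.length : Int) - 1) 1).foldl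
      (fun (s : List (List Int) × Int) i =>
        if PySem.List.pyGetD idxs (i + 1) 0 - PySem.List.pyGetD idxs i 0 > th
        then (s.1 ++ [[s.2, PySem.List.pyGetD idxs i 0]], PySem.List.pyGetD idxs (i + 1) 0)
        else s)
      (ranges, x1)
    st.1 ++ [[st.2, x2]]

-- ===== PORT B =====
def groupClosePointsIntoRanges_alt (idxs : List Int) (th : Int) : List (List Int) :=
  let st := idxs.foldl
    (fun (s : List (List Int) × List Int) x =>
      if s.2 ≠ [] ∧ x - PySem.List.pyGetD s.2 (-1) 0 > th
      then (s.1 ++ [s.2], [x])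
      else (s.1, s.2 ++ [x]))
    ([], [])
  let groups := if st.2 ≠ [] then st.1 ++ [st.2] else st.1
  groups.map (fun g => [PySem.List.pyGetD g 0 0, PySem.List.pyGetD g (-1) 0])

-- ===== PRECONDITION & SPEC =====
def Spec_groupClosePointsIntoRanges (idxs : List Int) (th : Int) (out : List (List Int)) : Prop := out = groupClosePointsIntoRanges_alt idxs th
instance (idxs : List Int) (th : Int) (out : List (List Int)) : Decidable (Spec_groupClosePointsIntoRanges idxs th out) := by unfold Spec_groupClosePointsIntoRanges; infer_instance

-- ===== CLAIM (what is proved, stated in full; the proofs are below) =====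
def Claim_equal_groupClosePointsIntoRanges : Prop := ∀ (idxs : List Int) (th : Int), Dom_groupClosePointsIntoRanges idxs th → Spec_groupClosePointsIntoRanges idxs th (groupClosePointsIntoRanges idxs th)

-- ===== LEMMAS AND PROOFS =====

-- Common characterization: ranges of the tail `l`, current group started at `x1`, previous point `prev`.
def pvCore (th x1 prev : Int) : List Int → List (List Int)
  | [] => [[x1, prev]]
  | y :: ys => if y - prev > th then [x1, prev] :: pvCore th y y ys else pvCore th x1 y ys

-- A's loop as structural recursion over the tail.
def pvCoreA (th : Int) (s : List (List Int) × Int) (prev : Int) : List Int → List (List Int) × Int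
  | [] => s
  | y :: ys => pvCoreA th (if y - prev > th then (s.1 ++ [[s.2, prev]], y) else s) y ys

lemma pvGetLast (a : Int) (as_ : List Int) :
    PySem.List.pyGetD (a :: as_) (-1) 0 = as_.getLastD a := by
  rw [PySem.List.pyGetD_neg_one (a :: as_) 0 (by simp), ← List.getLastD_cons (a := 0),
    List.getLastD_eq_getLast?, List.getLast?_eq_some_getLast (by simp)]
  rfl

lemma pvFoldA_eq_coreA (th : Int) (l : List Int) : ∀ (x : Int) (s : List (List Int) × Int),
    (List.range l.length).foldl
      (fun s k =>
        if (x :: l).getD (k + 1) 0 - (x :: l).getD k 0 > th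
        then (s.1 ++ [[s.2, (x :: l).getD k 0]], (x :: l).getD (k + 1) 0)
        else s) s
    = pvCoreA th s x l := by
  induction l with
  | nil => intro x s; simp [pvCoreA]
  | cons y ys ih =>
    intro x s
    rw [List.length_cons, List.range_succ_eq_map]
    simp only [List.foldl_cons, List.foldl_map, List.getD_cons_succ, List.getD_cons_zero]
    exact ih y _

lemma pvCoreA_eq_core (th : Int) (l : List Int) : ∀ (prev : Int) (s : List (List Int) × Int),
    (pvCoreA th s prev l).1 ++ [[(pvCoreA th s prev l).2, l.getLastD prev]]
    = s.1 ++ pvCore th s.2 prev l := by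
  induction l with
  | nil => intro prev s; simp [pvCoreA, pvCore]
  | cons y ys ih =>
    intro prev s
    simp only [pvCoreA, pvCore, List.getLastD_cons]
    by_cases h : y - prev > th
    · simp only [h, if_pos]
      rw [ih y _]
      simp
    · simp only [h, if_neg, not_false_iff]
      rw [ih y s]

lemma pvFoldB_eq_core (th : Int) (l : List Int) : ∀ (groups : List (List Int)) (a : Int) (as_ : List Int),
    (let st := l.foldl
        (fun (s : List (List Int) × List Int) x =>
          if s.2 ≠ [] ∧ x - PySem.List.pyGetD s.2 (-1) 0 > th
          then (s.1 ++ [s.2], [x])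
          else (s.1, s.2 ++ [x]))
        (groups, a :: as_)
      let gs := if st.2 ≠ [] then st.1 ++ [st.2] else st.1
      gs.map (fun g => [PySem.List.pyGetD g 0 0, PySem.List.pyGetD g (-1) 0]))
    = groups.map (fun g => [PySem.List.pyGetD g 0 0, PySem.List.pyGetD g (-1) 0])
      ++ pvCore th a (as_.getLastD a) l := by
  induction l with
  | nil =>
    intro groups a as_
    simp [pvCore, pvGetLast, PySem.List.pyGetD_zero_cons]
  | cons y ys ih =>
    intro groups a as_
    simp only [List.foldl_cons, pvGetLast]
    by_cases h : y - as_.getLastD a > th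
    · simp only [ne_eq, reduceCtorEq, not_false_eq_true, true_and, h, if_pos]
      have hrec := ih (groups ++ [a :: as_]) y []
      simp only [List.getLastD_nil] at hrec
      rw [hrec]
      rw [show pvCore th a (as_.getLastD a) (y :: ys) = [a, as_.getLastD a] :: pvCore th y y ys from by
        simp only [pvCore]; rw [if_pos h]]
      simp [pvGetLast, PySem.List.pyGetD_zero_cons]
    · simp only [ne_eq, reduceCtorEq, not_false_eq_true, true_and, h, if_neg]
      rw [show (a :: as_) ++ [y] = a :: (as_ ++ [y]) from by simp]
      have hrec := ih groups a (as_ ++ [y])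
      simp only at hrec
      have hlast : (as_ ++ [y]).getLastD a = y := by simp [List.getLastD_eq_getLast?]
      rw [hlast] at hrec
      rw [hrec]
      rw [show pvCore th a (as_.getLastD a) (y :: ys) = pvCore th a y ys from by
        simp only [pvCore]; rw [if_neg h]]

-- ===== VERDICT (by name: the statement is the Claim_ definition above) =====
theorem groupClosePointsIntoRanges_spec : Claim_equal_groupClosePointsIntoRanges := by
  intro idxs th _
  unfold Spec_groupClosePointsIntoRanges groupClosePointsIntoRanges groupClosePointsIntoRanges_alt
  cases idxs with
  | nil => simp
  | cons x xs =>
    rw [if_neg (by simp)]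
    simp only []
    -- A side: pyRange → Nat range → pvCoreA → pvCore
    rw [show (((x :: xs).length : Int)) - 1 = ((xs.length : Nat) : Int) by
      push_cast [List.length_cons]; ring]
    rw [PySem.List.pyRange_zero_natCast xs.length, List.foldl_map]
    have hcast : ∀ (k : Nat), ((k : Int) + 1) = (((k + 1 : Nat) : Int)) := by
      intro k; push_cast; ring
    have hA :
        (List.range xs.length).foldl
          (fun (s : List (List Int) × Int) (k : Nat) =>
            if PySem.List.pyGetD (x :: xs) ((k : Int) + 1) 0 - PySem.List.pyGetD (x :: xs) (k : Int) 0 > th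
            then (s.1 ++ [[s.2, PySem.List.pyGetD (x :: xs) (k : Int) 0]],
                  PySem.List.pyGetD (x :: xs) ((k : Int) + 1) 0)
            else s)
          ([], PySem.List.pyGetD (x :: xs) 0 0)
        = pvCoreA th ([], x) x xs := by
      rw [PySem.List.pyGetD_zero_cons]
      calc _ = (List.range xs.length).foldl
            (fun (s : List (List Int) × Int) (k : Nat) =>
              if (x :: xs).getD (k + 1) 0 - (x :: xs).getD k 0 > th
              then (s.1 ++ [[s.2, (x :: xs).getD k 0]], (x :: xs).getD (k + 1) 0)
              else s)
            ([], x) := by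
            simp only [hcast, PySem.List.pyGetD_natCast]
        _ = pvCoreA th ([], x) x xs := pvFoldA_eq_coreA th xs x _
    rw [hA, pvGetLast x xs]
    have hAcore := pvCoreA_eq_core th xs x ([], x)
    simp only [List.nil_append] at hAcore
    rw [hAcore]
    -- B side
    simp only [List.foldl_cons]
    rw [show (if ([] : List Int) ≠ [] ∧ x - PySem.List.pyGetD ([] : List Int) (-1) 0 > th
        then (([] : List (List Int)) ++ [([] : List Int)], [x])
        else (([] : List (List Int)), [] ++ [x]))
      = (([] : List (List Int)), [x]) from by simp]
    have hB := pvFoldB_eq_core th xs [] x []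
    simp only [List.map_nil, List.nil_append, List.getLastD_nil] at hB
    exact hB.symm
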